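-- pv_equiv track=rewrite | github.com/vuggesaikalyan/Hackerank-Algorithms-python | Happy LadyBugs.py | happy_ladybugs
-- ===== SOURCE A (Python) =====
-- def happy_ladybugs(bugs):
--     mappings = {}
--     free_cell = False
--     happy = True
--
--     for i, bug in enumerate(bugs):
--         if i == 0 and i + 1 < len(bugs):
--             happy = bug == bugs[i + 1]
--         elif i == len(bugs) - 1:
--             happy = bugs[i - 1] == bug and happy
--         else:
--             happy = happy and (bugs[i - 1] == bug or bugs[i + 1] == bug)
--
--         # count the bugs
--         if bug == '_':
--             free_cell = True
--         elif bug in mappings: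
--             mappings[bug] += 1
--         else:
--             mappings[bug] = 1
--
--     singles = 0
--
--     for bug, count in mappings.items():
--         if count == 1:
--             singles += 1
--
--     if singles > 0:
--         return 'NO'
--
--     if not free_cell:
--         return 'YES' if happy else 'NO'
--
--     return 'YES'
-- ===== SOURCE B (Python) =====
-- def _runs(bugs):
--     # maximal runs of equal adjacent elements, as (value, length) pairs
--     runs = []
--     i = 0
--     n = len(bugs)
--     while i < n:
--         j = i + 1
--         while j < n and bugs[j] == bugs[i]:
--             j += 1
--         runs.append((bugs[i], j - i))
--         i = j
--     return runs
--
--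
-- def happy_ladybugs(bugs):
--     runs = _runs(bugs)
--     counts = {}
--     for color, length in runs:
--         if color != '_':
--             counts[color] = counts.get(color, 0) + length
--     if any(c == 1 for c in counts.values()):
--         return 'NO'
--     if any(color == '_' for color, _ in runs):
--         return 'YES'
--     return 'YES' if all(length >= 2 for _, length in runs) else 'NO'
-- ===== Notes on version B (the rewrite author's own statement) =====
-- stated objective: alternative
-- what changed: B replaces A's per-index neighbor-comparison loop with dict bookkeeping by a run-length encoding: it groups the cells into maximal runs once, derives color counts by summing run lengths, detects a free cell from the run colors, and calls the row happy iff every run has length >= 2.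
import Mathlib
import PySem

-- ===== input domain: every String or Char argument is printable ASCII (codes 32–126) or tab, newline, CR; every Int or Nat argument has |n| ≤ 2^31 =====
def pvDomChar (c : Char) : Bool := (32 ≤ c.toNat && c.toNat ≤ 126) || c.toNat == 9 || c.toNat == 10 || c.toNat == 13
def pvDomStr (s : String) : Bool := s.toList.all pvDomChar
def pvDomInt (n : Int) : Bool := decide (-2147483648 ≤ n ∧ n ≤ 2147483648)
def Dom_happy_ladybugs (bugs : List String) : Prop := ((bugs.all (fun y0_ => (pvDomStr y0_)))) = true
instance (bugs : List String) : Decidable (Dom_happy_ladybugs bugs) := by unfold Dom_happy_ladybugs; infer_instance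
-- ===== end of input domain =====

-- B re-implements the happiness test via run-length encoding (maximal runs, every run ≥ 2)
-- instead of A's per-index neighbor comparisons with a count dict; same results, same O(n) cost.


-- ===== PORT A =====
-- loop body of A; the indexed accesses bugs[i+1] / bugs[i-1] are in range at every
-- reachable i (including bugs[-1] at i = 0 on a singleton list), so pyGetD is exact here
def aStep (bugs : List String) (st : PySem.Dict String Int × Bool × Bool) (p : Int × String) :
    PySem.Dict String Int × Bool × Bool :=
  let mappings := st.1
  let free_cell := st.2.1
  let happy := st.2.2
  let i := p.1
  let bug := p.2
  let happy :=
    if i = 0 ∧ i + 1 < PySem.List.len bugs then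
      bug == PySem.List.pyGetD bugs (i + 1) ""
    else if i = PySem.List.len bugs - 1 then
      (PySem.List.pyGetD bugs (i - 1) "" == bug) && happy
    else
      happy && ((PySem.List.pyGetD bugs (i - 1) "" == bug) || (PySem.List.pyGetD bugs (i + 1) "" == bug))
  if bug == "_" then (mappings, true, happy)
  else if mappings.contains bug then (mappings.insert bug (mappings.getD bug 0 + 1), free_cell, happy)
  else (mappings.insert bug 1, free_cell, happy)

def happy_ladybugs (bugs : List String) : String :=
  let st := (PySem.List.enumerate bugs).foldl (aStep bugs) (PySem.Dict.empty, false, true)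
  let singles := st.1.items.foldl (fun (s : Int) (p : String × Int) => if p.2 = 1 then s + 1 else s) 0
  if singles > 0 then "NO"
  else if !st.2.1 then (if st.2.2 then "YES" else "NO")
  else "YES"

-- ===== PORT B =====
-- Source B's _runs: each outer-loop step takes the maximal run at the current position
-- (inner while = 1 + |takeWhile (== head) rest|) and continues on the remaining suffix
-- (dropWhile); the recursion below is that outer loop over the remaining suffix
def runsOf (l : List String) : List (String × Int) :=
  match l with
  | [] => []
  | b :: rest =>
      (b, 1 + ((rest.takeWhile (fun x => x == b)).length : Int)) ::
        runsOf (rest.dropWhile (fun x => x == b))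
termination_by l.length
decreasing_by
  simpa using Nat.lt_succ_of_le (List.length_dropWhile_le _ _)

def happy_ladybugs_alt (bugs : List String) : String :=
  let runs := runsOf bugs
  let counts := runs.foldl
    (fun (d : PySem.Dict String Int) (p : String × Int) =>
      if p.1 ≠ "_" then d.insert p.1 (d.getD p.1 0 + p.2) else d)
    PySem.Dict.empty
  if counts.values.any (fun c => c == 1) then "NO"
  else if runs.any (fun p => p.1 == "_") then "YES"
  else if runs.all (fun p => 2 ≤ p.2) then "YES" else "NO"

-- ===== PRECONDITION & SPEC =====
def Spec_happy_ladybugs (bugs : List String) (out : String) : Prop := out = happy_ladybugs_alt bugs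
instance (bugs : List String) (out : String) : Decidable (Spec_happy_ladybugs bugs out) := by unfold Spec_happy_ladybugs; infer_instance

-- ===== CLAIM (what is proved, stated in full; the proofs are below) =====
def Claim_equal_happy_ladybugs : Prop := ∀ (bugs : List String), Dom_happy_ladybugs bugs → Spec_happy_ladybugs bugs (happy_ladybugs bugs)

-- ===== LEMMAS AND PROOFS =====


-- proof-side names for the three components of A's loop body
def gA (d : PySem.Dict String Int) (bug : String) : PySem.Dict String Int :=
  if bug == "_" then d
  else if d.contains bug then d.insert bug (d.getD bug 0 + 1)
  else d.insert bug 1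

def aHappy (bugs : List String) (h : Bool) (p : Int × String) : Bool :=
  if p.1 = 0 ∧ p.1 + 1 < PySem.List.len bugs then p.2 == PySem.List.pyGetD bugs (p.1 + 1) ""
  else if p.1 = PySem.List.len bugs - 1 then (PySem.List.pyGetD bugs (p.1 - 1) "" == p.2) && h
  else h && ((PySem.List.pyGetD bugs (p.1 - 1) "" == p.2) || (PySem.List.pyGetD bugs (p.1 + 1) "" == p.2))

def hTail (bugs : List String) (p : Int × String) : Bool :=
  if p.1 = PySem.List.len bugs - 1 then (PySem.List.pyGetD bugs (p.1 - 1) "" == p.2)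
  else ((PySem.List.pyGetD bugs (p.1 - 1) "" == p.2) || (PySem.List.pyGetD bugs (p.1 + 1) "" == p.2))

-- "no isolated cell": every index has an equal neighbour
def NI (l : List String) : Prop :=
  ∀ k : Nat, k < l.length →
    (1 ≤ k ∧ l.getD (k-1) "" = l.getD k "") ∨ (k+1 < l.length ∧ l.getD (k+1) "" = l.getD k "")

lemma aStep_eq (bugs : List String) (d : PySem.Dict String Int) (f h : Bool) (p : Int × String) :
    aStep bugs (d, f, h) p = (gA d p.2, f || (p.2 == "_"), aHappy bugs h p) := by
  simp only [aStep, gA, aHappy]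
  cases hu : (p.2 == "_") <;> split_ifs <;> simp_all

lemma foldl_aStep (bugs : List String) (l : List (Int × String)) :
    ∀ (d : PySem.Dict String Int) (f h : Bool),
    l.foldl (aStep bugs) (d, f, h) =
      (l.foldl (fun d p => gA d p.2) d,
       f || l.any (fun p => p.2 == "_"),
       l.foldl (aHappy bugs) h) := by
  induction l with
  | nil => intro d f h; simp
  | cons x xs ih =>
      intro d f h
      rw [List.foldl_cons, aStep_eq, ih]
      simp [Bool.or_assoc]

lemma gA_eq (d : PySem.Dict String Int) (bug : String) :
    gA d bug = if (!(bug == "_")) then d.insert bug (d.getD bug 0 + 1) else d := by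
  unfold gA
  cases hu : (bug == "_") with
  | true => simp
  | false =>
      cases hc : d.contains bug with
      | true => simp
      | false => simp [PySem.Dict.getD_of_not_contains d 0 hc]

lemma dictA_eq (bugs : List String) :
    bugs.foldl gA PySem.Dict.empty =
      (bugs.filter (fun x => !(x == "_"))).foldl
        (fun d b => d.insert b (d.getD b 0 + 1)) PySem.Dict.empty := by
  rw [← PySem.List.foldl_if_eq_foldl_filter]
  exact PySem.List.foldl_congr_mem _ _ _ _ (fun d x _ => gA_eq d x)

lemma nodupA (bugs : List String) : (bugs.foldl gA PySem.Dict.empty).keys.Nodup := by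
  rw [dictA_eq]
  exact PySem.Dict.nodup_keys_foldl_insert _ _ _ (by simp [PySem.Dict.keys_empty])

lemma keysA_mem (bugs : List String) (c : String) :
    c ∈ (bugs.foldl gA PySem.Dict.empty).keys ↔ (c ∈ bugs ∧ c ≠ "_") := by
  rw [dictA_eq, PySem.Dict.keys_foldl_insert]
  simp [PySem.Set.mem_update, PySem.Dict.keys_empty, List.mem_filter, and_comm]

lemma getDA (bugs : List String) (c : String) (hc : c ≠ "_") :
    (bugs.foldl gA PySem.Dict.empty).getD c 0 = (bugs.count c : Int) := by
  rw [dictA_eq, PySem.Dict.getD_foldl_insert_add_one]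
  rw [PySem.Dict.getD_empty, List.count_filter (by simp [hc])]
  simp

lemma singlesA_pos_iff (bugs : List String) :
    (0 < ((bugs.foldl gA PySem.Dict.empty).items.foldl
        (fun (s : Int) (p : String × Int) => if p.2 = 1 then s + 1 else s) 0)) ↔
      ∃ c, c ∈ bugs ∧ c ≠ "_" ∧ bugs.count c = 1 := by
  rw [PySem.List.foldl_ite_add_one (fun p : String × Int => p.2 = 1)]
  rw [PySem.Dict.items_eq_map_keys _ (nodupA bugs) 0]
  rw [List.countP_map]
  constructor
  · intro hpos
    have : 0 < List.countP ((fun x => decide (x.2 = 1)) ∘ fun k => (k, (bugs.foldl gA PySem.Dict.empty).getD k 0)) (bugs.foldl gA PySem.Dict.empty).keys := by omega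
    obtain ⟨c, hmem, hp⟩ := List.countP_pos_iff.mp this
    obtain ⟨hcb, hcu⟩ := (keysA_mem bugs c).mp hmem
    refine ⟨c, hcb, hcu, ?_⟩
    have := getDA bugs c hcu
    simp only [Function.comp, decide_eq_true_eq] at hp
    rw [this] at hp
    exact_mod_cast hp
  · rintro ⟨c, hcb, hcu, hcount⟩
    have hpos : 0 < List.countP ((fun x => decide (x.2 = 1)) ∘ fun k => (k, (bugs.foldl gA PySem.Dict.empty).getD k 0)) (bugs.foldl gA PySem.Dict.empty).keys := by
      refine List.countP_pos_iff.mpr ⟨c, (keysA_mem bugs c).mpr ⟨hcb, hcu⟩, ?_⟩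
      simp only [Function.comp, decide_eq_true_eq]
      rw [getDA bugs c hcu, hcount]
      norm_num
    omega

-- ---- runs ----

lemma runs_count (l : List String) (c : String) :
    ((((runsOf l).filter (fun p => p.1 == c)).map (fun p => p.2)).sum) = (l.count c : Int) := by
  match l with
  | [] => simp [runsOf]
  | b :: rest =>
    have ih := runs_count (rest.dropWhile (fun x => x == b)) c
    have htb : rest.takeWhile (fun x => x == b) = List.replicate (rest.takeWhile (fun x => x == b)).length b :=
      List.eq_replicate_of_mem (fun x hx => by simpa using List.mem_takeWhile_imp hx)
    have hcount : (b :: rest).count c =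
        (if c = b then (rest.takeWhile (fun x => x == b)).length + 1 else 0) +
          (rest.dropWhile (fun x => x == b)).count c := by
      conv_lhs => rw [← List.takeWhile_append_dropWhile (p := fun x => x == b) (l := rest)]
      rw [show (b :: (rest.takeWhile (fun x => x == b) ++ rest.dropWhile (fun x => x == b))) =
            (b :: rest.takeWhile (fun x => x == b)) ++ rest.dropWhile (fun x => x == b) from rfl]
      rw [List.count_append]
      congr 1
      rw [List.count_cons, htb, List.count_replicate]
      rcases eq_or_ne c b with h | h
      · subst h; simp
      · simp only [h, if_false]
        simp
        exact ⟨fun h' => absurd h'.symm h, fun h' => h h'.symm⟩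
    rw [runsOf, hcount]
    rcases eq_or_ne c b with hcb | hcb
    · subst hcb
      rw [List.filter_cons, if_pos (by simp)]
      rw [List.map_cons, List.sum_cons, ih, if_pos rfl]
      push_cast
      ring
    · rw [List.filter_cons, if_neg (by intro hb; simp [beq_iff_eq] at hb; exact hcb hb.symm)]
      rw [ih, if_neg hcb]
      simp
termination_by l.length
decreasing_by simpa using Nat.lt_succ_of_le (List.length_dropWhile_le _ _)

lemma runs_colors (l : List String) (c : String) :
    c ∈ (runsOf l).map (fun p => p.1) ↔ c ∈ l := by
  match l with
  | [] => simp [runsOf]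
  | b :: rest =>
    have ih := runs_colors (rest.dropWhile (fun x => x == b)) c
    have htb : ∀ x ∈ rest.takeWhile (fun x => x == b), x = b :=
      fun x hx => by simpa using List.mem_takeWhile_imp hx
    rw [runsOf, List.map_cons]
    constructor
    · intro hmem
      rcases List.mem_cons.mp hmem with h | h
      · simp [h]
      · right
        have := ih.mp h
        conv_rhs => rw [← List.takeWhile_append_dropWhile (p := fun x => x == b) (l := rest)]
        exact List.mem_append_right _ this
    · intro hmem
      rcases List.mem_cons.mp hmem with h | h
      · simp [h]
      · conv at h => rw [← List.takeWhile_append_dropWhile (p := fun x => x == b) (l := rest)]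
        rcases List.mem_append.mp h with h' | h'
      
        · simp [htb c h']
        · exact List.mem_cons_of_mem _ (ih.mpr h')
termination_by l.length
decreasing_by simpa using Nat.lt_succ_of_le (List.length_dropWhile_le _ _)

lemma NI_rep (b : String) (k : Nat) (R : List String) (hk : 1 ≤ k)
    (hR : R.head? ≠ some b) :
    NI (List.replicate k b ++ R) ↔ (2 ≤ k ∧ NI R) := by
  have hget : ∀ j : Nat, (List.replicate k b ++ R).getD j "" = if j < k then b else R.getD (j - k) "" := by
    intro j
    by_cases hj : j < k
    · rw [if_pos hj, List.getD_append _ _ _ _ (by simpa using hj), List.getD_replicate _ hj]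
    · rw [if_neg hj, List.getD_append_right _ _ _ _ (by simpa using Nat.le_of_not_lt hj)]
      simp
  have hR0 : ∀ (_ : 0 < R.length), R.getD 0 "" ≠ b := by
    intro hne
    cases R with
    | nil => simp at hne
    | cons a as => simpa using hR
  simp only [NI, List.length_append, List.length_replicate]
  constructor
  · intro hNI
    have h2 : 2 ≤ k := by
      by_contra hlt
      have hk1 : k = 1 := by omega
      rcases hNI 0 (by omega) with ⟨h1, _⟩ | ⟨hb, heq⟩
      · omega
      · rw [hget (0+1), hget 0, if_neg (by omega), if_pos (by omega)] at heq
        exact hR0 (by omega) (by rw [hk1] at heq; simpa using heq)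
    refine ⟨h2, ?_⟩
    intro j hj
    rcases hNI (k + j) (by omega) with ⟨h1, heq⟩ | ⟨hb, heq⟩
    · rcases Nat.eq_zero_or_pos j with hj0 | hjpos
      · subst hj0
        rw [hget (k + 0 - 1), hget (k + 0), if_pos (by omega), if_neg (by omega)] at heq
        exact absurd heq.symm (by simpa using hR0 (by omega))
      · left
        refine ⟨hjpos, ?_⟩
        rw [hget (k + j - 1), hget (k + j), if_neg (by omega), if_neg (by omega)] at heq
        rw [show k + j - 1 - k = j - 1 by omega, show k + j - k = j by omega] at heq
        exact heq
    · right
      refine ⟨by omega, ?_⟩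
      rw [hget (k + j + 1), hget (k + j), if_neg (by omega), if_neg (by omega)] at heq
      rw [show k + j + 1 - k = j + 1 by omega, show k + j - k = j by omega] at heq
      exact heq
  · rintro ⟨h2, hNIR⟩
    intro j hj
    by_cases hjk : j < k
    · by_cases hj1 : j + 1 < k
      · right
        refine ⟨by omega, ?_⟩
        rw [hget (j+1), hget j, if_pos hj1, if_pos hjk]
      · left
        refine ⟨by omega, ?_⟩
        rw [hget (j-1), hget j, if_pos (by omega), if_pos hjk]
    · have hm : j - k < R.length := by omega
      rcases hNIR (j - k) hm with ⟨h1, heq⟩ | ⟨hb, heq⟩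
      · left
        refine ⟨by omega, ?_⟩
        rw [hget (j-1), hget j, if_neg (by omega), if_neg (by omega)]
        rw [show j - 1 - k = j - k - 1 by omega]
        exact heq
      · right
        refine ⟨by omega, ?_⟩
        rw [hget (j+1), hget j, if_neg (by omega), if_neg (by omega)]
        rw [show j + 1 - k = j - k + 1 by omega]
        exact heq

lemma runs_all (l : List String) :
    ((runsOf l).all (fun p => decide (2 ≤ p.2)) = true) ↔ NI l := by
  match l with
  | [] =>
      constructor
      · intro _ k hk; simp at hk
      · intro _; simp [runsOf]
  | b :: rest =>
    have ih := runs_all (rest.dropWhile (fun x => x == b))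
    have htb : rest.takeWhile (fun x => x == b) = List.replicate (rest.takeWhile (fun x => x == b)).length b :=
      List.eq_replicate_of_mem (fun x hx => by simpa using List.mem_takeWhile_imp hx)
    have hshape : b :: rest =
        List.replicate ((rest.takeWhile (fun x => x == b)).length + 1) b ++ rest.dropWhile (fun x => x == b) := by
      rw [List.replicate_succ, List.cons_append, ← htb]
      rw [List.takeWhile_append_dropWhile]
    have hhead : (rest.dropWhile (fun x => x == b)).head? ≠ some b := by
      cases hD : rest.dropWhile (fun x => x == b) with
      | nil => simp
      | cons a as =>
          have hnb := List.head_dropWhile_not (fun x => x == b) (l := rest) (by simp [hD])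
          simp only [List.head?_cons, ne_eq, Option.some.injEq]
          simp only [hD, List.head_cons] at hnb
          simpa using hnb
    rw [runsOf, List.all_cons]
    conv_rhs => rw [hshape]
    rw [NI_rep b ((rest.takeWhile (fun x => x == b)).length + 1) (rest.dropWhile (fun x => x == b)) (by omega) hhead]
    rw [← ih]
    simp only [Bool.and_eq_true, decide_eq_true_eq]
    constructor
    · rintro ⟨h1, h2⟩; exact ⟨by omega, h2⟩
    · rintro ⟨h1, h2⟩; exact ⟨by omega, h2⟩
termination_by l.length
decreasing_by simpa using Nat.lt_succ_of_le (List.length_dropWhile_le _ _)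

-- ---- B's dict ----

lemma getD_weight (l : List (String × Int)) :
    ∀ (d : PySem.Dict String Int) (c : String),
    (l.foldl (fun d p => d.insert p.1 (d.getD p.1 0 + p.2)) d).getD c 0 =
      d.getD c 0 + ((l.filter (fun p => p.1 == c)).map (fun p => p.2)).sum := by
  induction l with
  | nil => intro d c; simp
  | cons a l ih =>
      intro d c
      rw [List.foldl_cons, ih, PySem.Dict.getD_insert, List.filter_cons]
      rcases eq_or_ne a.1 c with h | h
      · subst h
        simp only [BEq.rfl, if_true, List.map_cons, List.sum_cons]
        ring
      · have h1 : (a.1 == c) = false := by simpa using h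
        have h2 : ¬ (c = a.1) := fun hh => h hh.symm
        simp only [h1, Bool.false_eq_true, if_false, h2]

lemma valuesB_iff (bugs : List String) :
    (((runsOf bugs).foldl
        (fun (d : PySem.Dict String Int) (p : String × Int) =>
          if p.1 ≠ "_" then d.insert p.1 (d.getD p.1 0 + p.2) else d)
        PySem.Dict.empty).values.any (fun c => c == 1) = true) ↔
      ∃ c, c ∈ bugs ∧ c ≠ "_" ∧ bugs.count c = 1 := by
  rw [PySem.List.foldl_ite_eq_foldl_filter (fun p : String × Int => p.1 ≠ "_")]
  have hnd : ((((runsOf bugs).filter (fun p => decide (p.1 ≠ "_"))).foldl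
      (fun d p => d.insert p.1 (d.getD p.1 0 + p.2)) PySem.Dict.empty)).keys.Nodup :=
    PySem.Dict.nodup_keys_foldl_insert_key _ (fun p : String × Int => p.1) _ _
      (by rw [PySem.Dict.keys_empty]; exact List.nodup_nil)
  have hkey : ∀ c : String,
      (c ∈ (PySem.Set.update (PySem.Dict.empty : PySem.Dict String Int).keys
        (((runsOf bugs).filter (fun p => decide (p.1 ≠ "_"))).map (fun p => p.1)))) ↔
      (c ∈ bugs ∧ c ≠ "_") := by
    intro c
    rw [PySem.Dict.keys_empty, PySem.Set.update_nil_left, PySem.Set.mem_ofList, List.mem_map]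
    constructor
    · rintro ⟨p, hp, rfl⟩
      have hpf := List.mem_filter.mp hp
      exact ⟨(runs_colors bugs p.1).mp (List.mem_map.mpr ⟨p, hpf.1, rfl⟩), by simpa using hpf.2⟩
    · rintro ⟨hcb, hcu⟩
      obtain ⟨p, hp, hpc⟩ := List.mem_map.mp ((runs_colors bugs c).mpr hcb)
      exact ⟨p, List.mem_filter.mpr ⟨hp, by simp [hpc, hcu]⟩, hpc⟩
  have hgd : ∀ c : String, c ≠ "_" →
      ((((runsOf bugs).filter (fun p => decide (p.1 ≠ "_"))).foldl
        (fun d p => d.insert p.1 (d.getD p.1 0 + p.2)) PySem.Dict.empty).getD c 0) =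
        (bugs.count c : Int) := by
    intro c hcu
    rw [getD_weight, PySem.Dict.getD_empty, List.filter_filter]
    rw [List.filter_congr (l := runsOf bugs)
      (q := fun p => p.1 == c) (fun x _ => by
        cases hxc : (x.1 == c) with
        | true =>
            have : x.1 = c := by simpa using hxc
            simp [this, hcu]
        | false => simp [hxc])]
    rw [runs_count bugs c]
    simp
  rw [PySem.Dict.values_eq_map_keys _ hnd 0, List.any_eq_true]
  rw [PySem.Dict.keys_foldl_insert_key _ (fun p : String × Int => p.1)]
  constructor
  · rintro ⟨v, hv, hv1⟩
    obtain ⟨cc, hcc, rfl⟩ := List.mem_map.mp hv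
    obtain ⟨hcb, hcu⟩ := (hkey cc).mp hcc
    refine ⟨cc, hcb, hcu, ?_⟩
    rw [hgd cc hcu] at hv1
    have : (bugs.count cc : Int) = 1 := by simpa using hv1
    exact_mod_cast this
  · rintro ⟨c, hcb, hcu, hcount⟩
    refine ⟨_, List.mem_map.mpr ⟨c, (hkey c).mpr ⟨hcb, hcu⟩, rfl⟩, ?_⟩
    rw [hgd c hcu, hcount]
    simp

lemma anyB_eq (bugs : List String) :
    (runsOf bugs).any (fun p => p.1 == "_") = bugs.any (fun b => b == "_") := by
  rw [Bool.eq_iff_iff, List.any_eq_true, List.any_eq_true]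
  constructor
  · rintro ⟨p, hp, hp1⟩
    have : ("_" : String) ∈ bugs := (runs_colors bugs "_").mp
      (List.mem_map.mpr ⟨p, hp, by simpa using hp1⟩)
    exact ⟨"_", this, by simp⟩
  · rintro ⟨b, hb, hb1⟩
    have hbu : b = "_" := by simpa using hb1
    subst hbu
    obtain ⟨p, hp, hpc⟩ := List.mem_map.mp ((runs_colors bugs "_").mpr hb)
    exact ⟨p, hp, by simp [hpc]⟩

-- ---- happiness ----

lemma foldl_and (l : List (Int × String)) (f : Int × String → Bool) (h : Bool) :
    l.foldl (fun h p => h && f p) h = (h && l.all f) := by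
  induction l generalizing h with
  | nil => simp
  | cons x xs ih => rw [List.foldl_cons, ih, List.all_cons, Bool.and_assoc]

lemma aHappy_ne_zero (bugs : List String) (h : Bool) (p : Int × String) (hp : p.1 ≠ 0) :
    aHappy bugs h p = (h && hTail bugs p) := by
  unfold aHappy hTail
  rw [if_neg (fun hand => hp hand.1)]
  split_ifs with h1
  · rw [Bool.and_comm]
  · rfl

lemma foldl_aHappy (bugs : List String) (l : List (Int × String)) (hl : ∀ p ∈ l, p.1 ≠ 0) (h : Bool) :
    l.foldl (aHappy bugs) h = (h && l.all (hTail bugs)) := by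
  rw [PySem.List.foldl_congr_mem l (aHappy bugs) (fun h p => h && hTail bugs p) h
    (fun acc x hx => aHappy_ne_zero bugs acc x (hl x hx))]
  exact foldl_and l (hTail bugs) h

lemma happy_iff_NI (x y : String) (rest : List String) :
    ((PySem.List.enumerate (x :: y :: rest)).foldl (aHappy (x :: y :: rest)) true = true) ↔
      NI (x :: y :: rest) := by
  have e1 : PySem.List.enumerate (x :: y :: rest) = (0, x) :: PySem.List.enumerate (y :: rest) 1 := by
    rw [PySem.List.enumerate_cons]
    norm_num
  have hne : ∀ p ∈ PySem.List.enumerate (y :: rest) 1, p.1 ≠ 0 := by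
    intro p hp
    obtain ⟨k, hk, rfl⟩ := (PySem.List.mem_enumerate_iff _ _ _).mp hp
    intro hc
    simp at hc
    omega
  have e2 : aHappy (x :: y :: rest) true (0, x) = (x == y) := by
    unfold aHappy
    rw [if_pos ⟨rfl, by simp [PySem.List.len_eq]⟩]
    norm_num [PySem.List.pyGetD_ofNat']
  rw [e1, List.foldl_cons, e2, foldl_aHappy _ _ hne, Bool.and_eq_true, List.all_eq_true, beq_iff_eq]
  have g1 : ∀ k : Nat, PySem.List.pyGetD (x :: y :: rest) ((1 + (k:Int)) - 1) "" = (x :: y :: rest).getD k "" := by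
    intro k
    rw [show (1 + (k:Int)) - 1 = ((k:Nat):Int) by ring, PySem.List.pyGetD_natCast]
  have g2 : ∀ k : Nat, PySem.List.pyGetD (x :: y :: rest) ((1 + (k:Int)) + 1) "" = (x :: y :: rest).getD (k+2) "" := by
    intro k
    rw [show (1 + (k:Int)) + 1 = (((k+2):Nat):Int) by push_cast; ring, PySem.List.pyGetD_natCast]
  have hcond : ∀ k : Nat, ((1 + (k:Int)) = PySem.List.len (x :: y :: rest) - 1) ↔ (k = rest.length) := by
    intro k
    simp [PySem.List.len_eq]
    omega
  have hTail_iff : ∀ k : Nat, ∀ hk : k < (y :: rest).length,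
      ((hTail (x :: y :: rest) ((1 + (k:Int)), (y :: rest)[k]) = true) ↔
        (((x :: y :: rest).getD k "" = (x :: y :: rest).getD (k+1) "") ∨
         (k + 2 < (x :: y :: rest).length ∧ (x :: y :: rest).getD (k+2) "" = (x :: y :: rest).getD (k+1) ""))) := by
    intro k hk
    have gk : (y :: rest)[k] = (x :: y :: rest).getD (k+1) "" := by
      rw [List.getD_cons_succ, List.getD_eq_getElem _ _ hk]
    unfold hTail
    simp only [gk]
    by_cases hkl : k = rest.length
    · rw [if_pos ((hcond k).mpr hkl)]
      rw [g1]
      simp only [beq_iff_eq]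
      constructor
      · intro h; exact Or.inl h
      · rintro (h | ⟨hb, h⟩)
        · exact h
        · exfalso; simp at hb; omega
    · rw [if_neg (fun hc => hkl ((hcond k).mp hc))]
      rw [g1, g2]
      simp only [Bool.or_eq_true, beq_iff_eq]
      constructor
      · rintro (h | h)
        · exact Or.inl h
        · exact Or.inr ⟨by simp at hk ⊢; omega, h⟩
      · rintro (h | ⟨_, h⟩)
        · exact Or.inl h
        · exact Or.inr h
  constructor
  · rintro ⟨hxy, hall⟩ j hj
    cases j with
    | zero =>
        right
        refine ⟨by simp, ?_⟩
        simpa using hxy.symm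
    | succ k =>
        have hk : k < (y :: rest).length := by simp at hj ⊢; omega
        have h := hall _ ((PySem.List.mem_enumerate_iff _ _ _).mpr ⟨k, hk, rfl⟩)
        rcases (hTail_iff k hk).mp h with h2 | ⟨hb, h2⟩
        · left; exact ⟨by omega, by simpa using h2⟩
        · right; exact ⟨by simpa using hb, by simpa using h2⟩
  · intro hNI
    constructor
    · rcases hNI 0 (by simp) with ⟨h1, _⟩ | ⟨_, h⟩
      · omega
      · simpa using h.symm
    · intro p hp
      obtain ⟨k, hk, rfl⟩ := (PySem.List.mem_enumerate_iff _ _ _).mp hp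
      rw [hTail_iff k hk]
      rcases hNI (k+1) (by simp at hk ⊢; omega) with ⟨_, h⟩ | ⟨hb, h⟩
      · left; simpa using h
      · right; exact ⟨by simpa using hb, by simpa using h⟩

lemma happy_eq_all (bugs : List String)
    (hF : bugs.any (fun b => b == "_") = false)
    (hS : ¬ ∃ c, c ∈ bugs ∧ c ≠ "_" ∧ bugs.count c = 1) :
    ((PySem.List.enumerate bugs).foldl (aHappy bugs) true) =
      (runsOf bugs).all (fun p => decide (2 ≤ p.2)) := by
  match bugs with
  | [] => simp [runsOf, PySem.List.enumerate_nil]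
  | [x] =>
      exfalso
      apply hS
      refine ⟨x, by simp, ?_, by simp⟩
      intro hx
      subst hx
      simp at hF
  | x :: y :: rest =>
      rw [Bool.eq_iff_iff]
      exact Iff.trans (happy_iff_NI x y rest) (runs_all _).symm

-- ===== VERDICT (by name: the statement is the Claim_ definition above) =====
theorem happy_ladybugs_spec : Claim_equal_happy_ladybugs := by
  intro bugs _
  show happy_ladybugs bugs = happy_ladybugs_alt bugs
  have hdict : (PySem.List.enumerate bugs).foldl (fun d p => gA d p.2) PySem.Dict.empty
      = bugs.foldl gA PySem.Dict.empty := by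
    conv_rhs => rw [← PySem.List.map_snd_enumerate bugs 0]
    rw [List.foldl_map]
  have hany : (PySem.List.enumerate bugs).any (fun p => p.2 == "_") = bugs.any (fun b => b == "_") := by
    conv_rhs => rw [← PySem.List.map_snd_enumerate bugs 0]
    rw [List.any_map]
    rfl
  unfold happy_ladybugs happy_ladybugs_alt
  simp only [foldl_aStep, hdict, hany, Bool.false_or]
  by_cases hS : ∃ c, c ∈ bugs ∧ c ≠ "_" ∧ bugs.count c = 1
  · rw [if_pos ((singlesA_pos_iff bugs).mpr hS), if_pos ((valuesB_iff bugs).mpr hS)]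
  · rw [if_neg (fun hp => hS ((singlesA_pos_iff bugs).mp hp)),
      if_neg (fun hp => hS ((valuesB_iff bugs).mp hp)), anyB_eq]
    rcases Bool.eq_false_or_eq_true (bugs.any (fun b => b == "_")) with hF | hF
    · rw [hF]
      norm_num
    · rw [hF]
      norm_num
      rw [happy_eq_all bugs hF hS]
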